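-- pv_equiv track=rewrite | github.com/SilviaPabon/LaboratorioVCSRemoto | preinforme12_SilviaPabon.py | difMayorMenor
-- ===== SOURCE A (Python) =====
-- def difMayorMenor(presion):
--     mayor = presion[0]
--     menor = presion[0]
--     for element in presion :
--         if mayor < element :
--             mayor = element
--         if menor > element :
--             menor = element
--     dif = mayor - menor
--     return dif
-- ===== SOURCE B (Python) =====
-- def difMayorMenor(presion):
--     s = sorted(presion)
--     return s[-1] - s[0]
-- ===== Notes on version B (the rewrite author's own statement) =====
-- stated objective: simpler
-- what changed: Replaces A's single accumulating pass maintaining a running max and min with sorting a copy and subtracting the first element of the sorted list from its last element.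
import Mathlib
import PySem

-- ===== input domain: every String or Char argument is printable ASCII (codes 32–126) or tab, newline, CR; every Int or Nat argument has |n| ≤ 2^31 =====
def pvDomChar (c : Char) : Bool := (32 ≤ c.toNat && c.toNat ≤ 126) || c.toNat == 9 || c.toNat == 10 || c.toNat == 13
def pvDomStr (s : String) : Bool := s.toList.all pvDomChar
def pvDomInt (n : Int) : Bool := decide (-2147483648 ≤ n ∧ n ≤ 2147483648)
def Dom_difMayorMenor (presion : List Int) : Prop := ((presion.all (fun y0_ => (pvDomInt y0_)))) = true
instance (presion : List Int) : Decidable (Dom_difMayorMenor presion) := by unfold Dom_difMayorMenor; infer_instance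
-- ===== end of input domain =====

-- B sorts a copy and subtracts the endpoints instead of A's accumulating max/min pass (simpler, not faster).

-- ===== PORT A =====
-- A: mayor = menor = presion[0]; one pass updating both; return mayor - menor.
def difMayorMenor (presion : List Int) : Int :=
  match PySem.List.pyGet? presion 0 with
  | none => 0  -- unreachable: Pre_ excludes [], where Python raises IndexError
  | some h =>
    let mm := presion.foldl (fun (p : Int × Int) e =>
      (if p.1 < e then e else p.1, if p.2 > e then e else p.2)) (h, h)
    mm.1 - mm.2

-- ===== PORT B =====
-- B: sort a copy, subtract first sorted element from the last.
def difMayorMenor_alt (presion : List Int) : Int :=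
  let s := PySem.List.sorted presion (fun x => x) false
  match PySem.List.pyGet? s (-1), PySem.List.pyGet? s 0 with
  | some a, some b => a - b
  | _, _ => 0  -- unreachable: Pre_ excludes [], where Python raises IndexError

-- ===== PRECONDITION & SPEC =====
-- Pre_ excludes the empty list, on which both A and B raise IndexError.
def Pre_difMayorMenor (presion : List Int) : Prop := presion ≠ []
instance (presion : List Int) : Decidable (Pre_difMayorMenor presion) := by unfold Pre_difMayorMenor; infer_instance
def pvWitness_difMayorMenor : List Int := ([3, -1, 7])

def Spec_difMayorMenor (presion : List Int) (out : Int) : Prop := out = difMayorMenor_alt presion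
instance (presion : List Int) (out : Int) : Decidable (Spec_difMayorMenor presion out) := by unfold Spec_difMayorMenor; infer_instance

-- ===== CLAIM (what is proved, stated in full; the proofs are below) =====
def Claim_equal_difMayorMenor : Prop := ∀ (presion : List Int), Dom_difMayorMenor presion → Pre_difMayorMenor presion → Spec_difMayorMenor presion (difMayorMenor presion)

-- ===== LEMMAS AND PROOFS =====

-- A's paired fold is the pair of the running max and the running min.
theorem pv_fold_pair (xs : List Int) (a b : Int) :
    xs.foldl (fun (p : Int × Int) e =>
      (if p.1 < e then e else p.1, if p.2 > e then e else p.2)) (a, b)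
    = (xs.foldl max a, xs.foldl min b) := by
  induction xs generalizing a b with
  | nil => rfl
  | cons x xs ih =>
    simp only [List.foldl_cons, ih]
    congr 1
    · by_cases h : a < x
      · simp [h, max_eq_right h.le]
      · simp [h, max_eq_left (not_lt.mp h)]
    · by_cases h : b > x
      · simp [h, min_eq_right (le_of_lt h)]
      · simp [h, min_eq_left (not_lt.mp h)]

-- ===== VERDICT (by name: the statement is the Claim_ definition above) =====
theorem difMayorMenor_spec : Claim_equal_difMayorMenor := by
  intro presion _hdom hpre
  unfold Spec_difMayorMenor difMayorMenor difMayorMenor_alt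
  obtain ⟨h, t, rfl⟩ := List.exists_cons_of_ne_nil hpre
  simp only [PySem.List.pyGet?_zero_cons, pv_fold_pair]
  -- the sorted list is nonempty
  have hsne : PySem.List.sorted (h :: t) (fun x => x) false ≠ [] := by
    simp [PySem.List.sorted_eq_nil_iff]
  obtain ⟨m, u, hs⟩ := List.exists_cons_of_ne_nil hsne
  have hperm : (PySem.List.sorted (h :: t) (fun x => x) false).Perm (h :: t) :=
    PySem.List.sorted_perm _ _ _
  -- s[-1] is the last element; s[0] is the head
  have hlast : PySem.List.pyGet? (PySem.List.sorted (h :: t) (fun x => x) false) (-1)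
      = (PySem.List.sorted (h :: t) (fun x => x) false).getLast? :=
    PySem.List.pyGet?_neg_one _
  rw [hlast, hs, List.getLast?_eq_some_getLast (l := m :: u) (by simp)]
  simp only [PySem.List.pyGet?_zero_cons, List.foldl_cons, max_self, min_self]
  -- head of sorted = running min, last of sorted = running max
  have hminspec := PySem.List.foldl_min_le t h
  have hmaxspec := PySem.List.le_foldl_max t h
  set M := t.foldl max h with hM
  set N := t.foldl min h with hN
  have hMmem : M ∈ h :: t := by
    rcases PySem.List.foldl_max_mem t h with h1 | h1
    · rw [hM, h1]; exact List.mem_cons_self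
    · exact List.mem_cons_of_mem _ h1
  have hNmem : N ∈ h :: t := by
    rcases PySem.List.foldl_min_mem t h with h1 | h1
    · rw [hN, h1]; exact List.mem_cons_self
    · exact List.mem_cons_of_mem _ h1
  have hMge : ∀ y ∈ h :: t, y ≤ M := by
    intro y hy
    rcases List.mem_cons.mp hy with rfl | hy
    · exact hmaxspec.1
    · exact hmaxspec.2 y hy
  have hNle : ∀ y ∈ h :: t, N ≤ y := by
    intro y hy
    rcases List.mem_cons.mp hy with rfl | hy
    · exact hminspec.1
    · exact hminspec.2 y hy
  -- m ≤ every element, and the last element dominates every element (sorted order)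
  have hmmin : ∀ y ∈ h :: t, m ≤ y := by
    intro y hy
    have := PySem.List.key_head_sorted_le (xs := h :: t) (key := fun x => x) hs
    exact this y hy
  have hmmem : m ∈ h :: t := hperm.mem_iff.mp (by rw [hs]; exact List.mem_cons_self)
  have hlastmem : (m :: u).getLast (by simp) ∈ h :: t := by
    refine hperm.mem_iff.mp ?_
    rw [hs]; exact List.getLast_mem _
  have hlastmax : ∀ y ∈ h :: t, y ≤ (m :: u).getLast (by simp) := by
    intro y hy
    have hys : y ∈ PySem.List.sorted (h :: t) (fun x => x) false := hperm.mem_iff.mpr hy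
    rw [hs] at hys
    obtain ⟨p, hp, rfl⟩ := List.getElem_of_mem hys
    have hlen : (m :: u).getLast (by simp) = (m :: u)[(m :: u).length - 1] := by
      rw [List.getLast_eq_getElem]
    rw [hlen]
    have := PySem.List.sorted_id_getElem_mono (xs := h :: t)
      (p := p) (q := (m :: u).length - 1)
      (by omega)
      (by rw [hs]; omega)
    simpa [hs] using this
  -- antisymmetry pins both values
  have hMeq : M = (m :: u).getLast (by simp) :=
    le_antisymm (hlastmax M hMmem) (hMge _ hlastmem)
  have hNeq : N = m := le_antisymm (hNle m hmmem) (hmmin N hNmem)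
  rw [hMeq, hNeq]
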